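-- pv_equiv track=rewrite | github.com/vlad-marlo/algorithms | school/webium/refresh/sozvon_4/01.py | solution
-- ===== SOURCE A (Python) =====
-- def solution(data: list[int]) -> tuple[int, int]:
--     count, mn = 0, 10 ** 10
--     min_positive = min([i for i in range(1, max(data)+1) if i in data])
--
--     for i in range(len(data) - 3):
--         if all(abs(x) % 111 != min_positive for x in data[i:i+4]):
--             count += 1
--             mn = min(mn, sum(data[i:i+4]))
--     return count, mn
-- ===== SOURCE B (Python) =====
-- def solution(data: list[int]) -> tuple[int, int]:
--     min_positive = min(x for x in data if x > 0)
--     pre = [0]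
--     badpre = [0]
--     for x in data:
--         pre.append(pre[-1] + x)
--         badpre.append(badpre[-1] + (abs(x) % 111 == min_positive))
--     count, mn = 0, 10 ** 10
--     for i in range(len(data) - 3):
--         if badpre[i + 4] == badpre[i]:
--             count += 1
--             s = pre[i + 4] - pre[i]
--             if s < mn:
--                 mn = s
--     return count, mn
-- ===== Notes on version B (the rewrite author's own statement) =====
-- stated objective: faster
-- what changed: B computes min_positive as a direct min over the positive elements instead of scanning range(1, max(data)+1) with a list-membership test per candidate, and replaces the per-window slice/all/sum rescans by prefix-sum and prefix-bad-count tables built once and looked up per window.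
import Mathlib
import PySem

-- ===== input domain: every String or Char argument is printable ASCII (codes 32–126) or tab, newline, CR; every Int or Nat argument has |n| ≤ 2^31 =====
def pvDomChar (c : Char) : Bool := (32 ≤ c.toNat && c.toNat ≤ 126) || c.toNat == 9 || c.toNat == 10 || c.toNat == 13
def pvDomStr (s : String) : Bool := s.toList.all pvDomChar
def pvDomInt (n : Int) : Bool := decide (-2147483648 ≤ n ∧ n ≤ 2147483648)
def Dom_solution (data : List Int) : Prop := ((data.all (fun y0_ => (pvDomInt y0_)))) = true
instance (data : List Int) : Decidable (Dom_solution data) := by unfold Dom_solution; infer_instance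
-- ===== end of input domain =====

-- B computes min_positive as a direct min over the positive elements instead of A's
-- range(1,max+1)-membership scan, and replaces A's per-window slice/all/sum rescans by
-- prefix-sum / prefix-bad-count tables built once and looked up per window.

-- ===== PORT A =====
def solution (data : List Int) : Int × Int :=
  match PySem.List.max? data (fun y => y) with
  | none => (0, 0)   -- Python: max([]) raises ValueError (outside Pre_)
  | some mx =>
    match PySem.List.min? ((PySem.List.pyRange 1 (mx + 1) 1).filter
        (fun i => data.contains i)) (fun y => y) with
    | none => (0, 0) -- Python: min([]) raises ValueError (outside Pre_)
    | some minPositive =>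
      (PySem.List.pyRange 0 ((data.length : Int) - 3) 1).foldl
        (fun (st : Int × Int) i =>
          if (PySem.List.slice data (some i) (some (i + 4))).all
              (fun x => PySem.Int.mod |x| 111 != minPositive) then
            (st.1 + 1, min st.2 (PySem.List.slice data (some i) (some (i + 4))).sum)
          else st)
        (0, 10 ^ 10)

-- ===== PORT B =====
def solution_alt (data : List Int) : Int × Int :=
  match PySem.List.min? (data.filter (fun x => decide (0 < x))) (fun y => y) with
  | none => (0, 0)   -- Python: min over an empty generator raises ValueError (outside Pre_)
  | some minPositive =>
    let pb := data.foldl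
      (fun (acc : List Int × List Int) x =>
        (acc.1 ++ [PySem.List.pyGetD acc.1 (-1) 0 + x],
         acc.2 ++ [PySem.List.pyGetD acc.2 (-1) 0 +
           (if PySem.Int.mod |x| 111 == minPositive then 1 else 0)]))
      ([0], [0])
    (PySem.List.pyRange 0 ((data.length : Int) - 3) 1).foldl
      (fun (st : Int × Int) i =>
        if PySem.List.pyGetD pb.2 (i + 4) 0 = PySem.List.pyGetD pb.2 i 0 then
          (st.1 + 1,
           if PySem.List.pyGetD pb.1 (i + 4) 0 - PySem.List.pyGetD pb.1 i 0 < st.2 then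
             PySem.List.pyGetD pb.1 (i + 4) 0 - PySem.List.pyGetD pb.1 i 0
           else st.2)
        else st)
      (0, 10 ^ 10)

-- ===== PRECONDITION & SPEC =====
-- Pre_ excludes exactly the inputs with no positive element, on which both Pythons raise ValueError.
def Pre_solution (data : List Int) : Prop := ∃ x ∈ data, 0 < x
instance (data : List Int) : Decidable (Pre_solution data) := by unfold Pre_solution; infer_instance
def pvWitness_solution : List Int := [3, -1, 2, 5, 7]

def Spec_solution (data : List Int) (out : Int × Int) : Prop := out = solution_alt data
instance (data : List Int) (out : Int × Int) : Decidable (Spec_solution data out) := by unfold Spec_solution; infer_instance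

-- ===== CLAIM (what is proved, stated in full; the proofs are below) =====
def Claim_equal_solution : Prop := ∀ (data : List Int), Dom_solution data → Pre_solution data → Spec_solution data (solution data)

-- ===== LEMMAS AND PROOFS =====

-- The two min_positive computations agree: both pick the least positive element of data.
theorem minpos_eq (data : List Int) (mx mp : Int)
    (hmx : PySem.List.max? data (fun y => y) = some mx)
    (hmp : PySem.List.min? (data.filter (fun x => decide (0 < x))) (fun y => y) = some mp) :
    PySem.List.min? ((PySem.List.pyRange 1 (mx + 1) 1).filter
      (fun i => data.contains i)) (fun y => y) = some mp := by
  have hmem : mp ∈ data.filter (fun x => decide (0 < x)) := PySem.List.min?_mem hmp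
  have hmin : ∀ y ∈ data.filter (fun x => decide (0 < x)), mp ≤ y := by
    intro y hy; exact PySem.List.min?_isMin hmp y hy
  have hmpd : mp ∈ data := (List.mem_filter.mp hmem).1
  have hmppos : 0 < mp := by
    have := (List.mem_filter.mp hmem).2; simpa using this
  have hle : mp ≤ mx := PySem.List.max?_isMax hmx mp hmpd
  have hmpc : mp ∈ (PySem.List.pyRange 1 (mx + 1) 1).filter (fun i => data.contains i) := by
    refine List.mem_filter.mpr ⟨?_, by simpa using hmpd⟩
    rw [PySem.List.mem_pyRange_one]; omega
  cases hc : PySem.List.min? ((PySem.List.pyRange 1 (mx + 1) 1).filter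
      (fun i => data.contains i)) (fun y => y) with
  | none =>
    have := (PySem.List.min?_eq_none_iff _ _).mp hc
    rw [this] at hmpc; simp at hmpc
  | some mc =>
    have hcmem := PySem.List.min?_mem hc
    have h1 : mc ∈ data ∧ 0 < mc := by
      have h := List.mem_filter.mp hcmem
      have hr := (PySem.List.mem_pyRange_one).mp h.1
      exact ⟨by simpa using h.2, by omega⟩
    have h2 : mp ≤ mc := hmin mc (List.mem_filter.mpr ⟨h1.1, by simp [h1.2]⟩)
    have h3 : mc ≤ mp := PySem.List.min?_isMin hc mp hmpc
    rw [le_antisymm h3 h2]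

-- B's table-building fold computes the prefix-sum and prefix-bad-count tables.
theorem build_eq (mp : Int) (data : List Int) :
    data.foldl
      (fun (acc : List Int × List Int) x =>
        (acc.1 ++ [PySem.List.pyGetD acc.1 (-1) 0 + x],
         acc.2 ++ [PySem.List.pyGetD acc.2 (-1) 0 +
           (if PySem.Int.mod |x| 111 == mp then 1 else 0)]))
      ([0], [0]) =
    ((List.range (data.length + 1)).map (fun k => (data.take k).sum),
     (List.range (data.length + 1)).map
       (fun k => ((data.take k).countP (fun x => PySem.Int.mod |x| 111 == mp) : Int))) := by
  induction data using List.reverseRecOn with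
  | nil => simp
  | append_singleton xs x ih =>
    rw [List.foldl_append, ih]
    simp only [List.foldl_cons, List.foldl_nil]
    have hmap1 : (List.range (xs.length + 1)).map
        (fun k => ((xs ++ [x]).take k).sum) =
        (List.range (xs.length + 1)).map (fun k => (xs.take k).sum) := by
      refine List.map_congr_left (fun k hk => ?_)
      rw [List.take_append_of_le_length (by simp at hk; omega)]
    have hmap2 : (List.range (xs.length + 1)).map
        (fun k => (((xs ++ [x]).take k).countP (fun x => PySem.Int.mod |x| 111 == mp) : Int)) =
        (List.range (xs.length + 1)).map
        (fun k => ((xs.take k).countP (fun x => PySem.Int.mod |x| 111 == mp) : Int)) := by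
      refine List.map_congr_left (fun k hk => ?_)
      rw [List.take_append_of_le_length (by simp at hk; omega)]
    have hlast1 : PySem.List.pyGetD
        ((List.range (xs.length + 1)).map (fun k => (xs.take k).sum)) (-1) 0 = xs.sum := by
      rw [List.range_succ, List.map_append, List.map_cons, List.map_nil,
        PySem.List.pyGetD_neg_one_append_singleton, List.take_length]
    have hlast2 : PySem.List.pyGetD
        ((List.range (xs.length + 1)).map
          (fun k => ((xs.take k).countP (fun x => PySem.Int.mod |x| 111 == mp) : Int))) (-1) 0 =
        (xs.countP (fun x => PySem.Int.mod |x| 111 == mp) : Int) := by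
      rw [List.range_succ, List.map_append, List.map_cons, List.map_nil,
        PySem.List.pyGetD_neg_one_append_singleton, List.take_length]
    have hrhs1 : (List.range (xs.length + 1 + 1)).map (fun k => ((xs ++ [x]).take k).sum) =
        (List.range (xs.length + 1)).map (fun k => (xs.take k).sum) ++ [xs.sum + x] := by
      rw [List.range_succ, List.map_append, List.map_cons, List.map_nil, hmap1]
      congr 1
      rw [List.take_of_length_le (by simp)]
      simp
    have hrhs2 : (List.range (xs.length + 1 + 1)).map
        (fun k => (((xs ++ [x]).take k).countP (fun x => PySem.Int.mod |x| 111 == mp) : Int)) =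
        (List.range (xs.length + 1)).map
          (fun k => ((xs.take k).countP (fun x => PySem.Int.mod |x| 111 == mp) : Int)) ++
        [(xs.countP (fun x => PySem.Int.mod |x| 111 == mp) : Int) +
          (if PySem.Int.mod |x| 111 == mp then 1 else 0)] := by
      rw [List.range_succ, List.map_append, List.map_cons, List.map_nil, hmap2]
      congr 1
      rw [List.take_of_length_le (by simp), List.countP_append]
      push_cast
      simp
    rw [Prod.mk.injEq]
    simp only [List.length_append, List.length_cons, List.length_nil, Nat.zero_add]
    exact ⟨by rw [hlast1, hrhs1], by rw [hlast2, hrhs2]⟩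

-- ===== VERDICT =====
theorem solution_spec : Claim_equal_solution := by
  intro data hdom hpre
  unfold Spec_solution solution solution_alt
  obtain ⟨p, hpmem, hppos⟩ := hpre
  have hfe : p ∈ data.filter (fun x => decide (0 < x)) :=
    List.mem_filter.mpr ⟨hpmem, by simp [hppos]⟩
  cases hmx : PySem.List.max? data (fun y => y) with
  | none =>
    have := (PySem.List.max?_eq_none_iff _ _).mp hmx
    subst this; simp at hpmem
  | some mx =>
  cases hmp : PySem.List.min? (data.filter (fun x => decide (0 < x))) (fun y => y) with
  | none =>
    have := (PySem.List.min?_eq_none_iff _ _).mp hmp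
    rw [this] at hfe; simp at hfe
  | some mp =>
  dsimp only
  rw [minpos_eq data mx mp hmx hmp]
  dsimp only
  rw [build_eq]
  refine PySem.List.foldl_congr_mem _ _ _ _ ?_
  intro st i hi
  have hib := (PySem.List.mem_pyRange_one).mp hi
  have hi0 : 0 ≤ i := hib.1
  have hi4 : i + 4 ≤ (data.length : Int) := by omega
  have hjn : i.toNat + 4 ≤ data.length := by omega
  -- the window
  have hslice : PySem.List.slice data (some i) (some (i + 4)) =
      (data.drop i.toNat).take 4 := by
    rw [PySem.List.slice_toNat data hi0 (by omega)]
    congr 1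
    omega
  -- table lookups
  have hget : ∀ (f : Nat → Int) (j : Int), 0 ≤ j → j ≤ (data.length : Int) →
      PySem.List.pyGetD ((List.range (data.length + 1)).map f) j 0 = f j.toNat := by
    intro f j hj0 hjle
    rw [PySem.List.pyGetD_of_nonneg _ _ hj0,
      PySem.List.getD_map_range f _ _ _ (by omega)]
  rw [hget _ i hi0 (by omega), hget _ i hi0 (by omega),
    hget _ (i + 4) (by omega) hi4, hget _ (i + 4) (by omega) hi4, hslice]
  have ht4 : (i + 4).toNat = i.toNat + 4 := by omega
  rw [ht4]
  -- prefix decompositions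
  have hsum : (data.take (i.toNat + 4)).sum =
      (data.take i.toNat).sum + ((data.drop i.toNat).take 4).sum := by
    rw [List.take_add, List.sum_append]
  have hcnt : (data.take (i.toNat + 4)).countP (fun x => PySem.Int.mod |x| 111 == mp) =
      (data.take i.toNat).countP (fun x => PySem.Int.mod |x| 111 == mp) +
      ((data.drop i.toNat).take 4).countP (fun x => PySem.Int.mod |x| 111 == mp) := by
    rw [List.take_add, List.countP_append]
  -- condition equivalence
  have hcond : (((data.drop i.toNat).take 4).all
        (fun x => PySem.Int.mod |x| 111 != mp) = true) ↔
      ((data.take (i.toNat + 4)).countP (fun x => PySem.Int.mod |x| 111 == mp) : Int) =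
      ((data.take i.toNat).countP (fun x => PySem.Int.mod |x| 111 == mp) : Int) := by
    rw [hcnt]
    push_cast
    constructor
    · intro h
      have : ((data.drop i.toNat).take 4).countP (fun x => PySem.Int.mod |x| 111 == mp) = 0 := by
        rw [List.countP_eq_zero]
        intro a ha
        have := List.all_eq_true.mp h a ha
        simpa using this
      omega
    · intro h
      have h0 : ((data.drop i.toNat).take 4).countP (fun x => PySem.Int.mod |x| 111 == mp) = 0 := by
        omega
      rw [List.all_eq_true]
      intro a ha
      have := List.countP_eq_zero.mp h0 a ha
      simpa using this
  by_cases hc : ((data.drop i.toNat).take 4).all (fun x => PySem.Int.mod |x| 111 != mp) = true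
  · rw [if_pos hc, if_pos (hcond.mp hc)]
    rw [Prod.mk.injEq]
    refine ⟨rfl, ?_⟩
    have hs : (data.take (i.toNat + 4)).sum - (data.take i.toNat).sum =
        ((data.drop i.toNat).take 4).sum := by omega
    rw [hs, min_def]
    split_ifs <;> omega
  · rw [if_neg hc, if_neg (fun h => hc (hcond.mpr h))]
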